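-- pv_equiv track=rewrite | github.com/jelambrar96-excersim/exercises | solutions/python/transpose/1/transpose.py | aux
-- ===== SOURCE A (Python) =====
-- def aux(iterable):
--     out = []
--     flag = True
--     for item in reversed(iterable):
--         if item is None and flag:
--             continue
--         flag = False
--         if item is None:
--             out.append(" ")
--         else:
--             out.append(item)
--     return "".join(reversed(out))
-- ===== SOURCE B (Python) =====
-- def aux(iterable):
--     last = -1
--     for i, x in enumerate(iterable):
--         if x is not None:
--             last = i
--     return "".join(" " if x is None else x for x in iterable[:last+1])
-- ===== Notes on version B (the rewrite author's own statement) =====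
-- stated objective: simpler
-- what changed: Replaces A's reversed accumulate-then-reverse loop with a forward pass recording the last non-None index followed by a single forward join over the prefix up to that index.
import Mathlib
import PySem

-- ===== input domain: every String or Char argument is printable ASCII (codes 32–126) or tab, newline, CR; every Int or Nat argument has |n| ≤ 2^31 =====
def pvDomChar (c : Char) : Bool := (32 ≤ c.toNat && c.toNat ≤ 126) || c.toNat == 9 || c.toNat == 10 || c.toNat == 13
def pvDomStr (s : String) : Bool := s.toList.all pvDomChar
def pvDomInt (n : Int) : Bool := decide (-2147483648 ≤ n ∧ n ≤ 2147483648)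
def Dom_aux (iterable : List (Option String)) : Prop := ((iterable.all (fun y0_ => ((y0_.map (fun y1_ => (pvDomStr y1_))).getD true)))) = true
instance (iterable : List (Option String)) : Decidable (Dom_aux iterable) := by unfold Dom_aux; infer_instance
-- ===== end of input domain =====

-- B strips trailing Nones by first finding the last non-None index, then mapping the prefix
-- forward; A instead walks the reversed list with a skip flag and reverses its accumulator.

-- ===== PORT A =====
-- the loop body: state is (out, flag)
def auxStep (s : List String × Bool) (item : Option String) : List String × Bool :=
  if item.isNone && s.2 then s
  else (s.1 ++ [match item with | none => " " | some x => x], false)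

def aux (iterable : List (Option String)) : String :=
  PySem.Str.join "" (iterable.reverse.foldl auxStep ([], true)).1.reverse

-- ===== PORT B =====
def aux_alt (iterable : List (Option String)) : String :=
  PySem.Str.join ""
    ((PySem.List.slice iterable none
        (some ((PySem.List.enumerate iterable).foldl
          (fun acc p => if p.2.isSome then p.1 else acc) (-1 : Int) + 1))).map
      (fun x => match x with | none => " " | some s => s))

-- ===== PRECONDITION & SPEC =====
def Spec_aux (iterable : List (Option String)) (out : String) : Prop := out = aux_alt iterable
instance (iterable : List (Option String)) (out : String) : Decidable (Spec_aux iterable out) := by unfold Spec_aux; infer_instance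

-- ===== CLAIM (what is proved, stated in full; the proofs are below) =====
def Claim_equal_aux : Prop := ∀ (iterable : List (Option String)), Dom_aux iterable → Spec_aux iterable (aux iterable)

-- ===== LEMMAS AND PROOFS =====

def toS (o : Option String) : String := match o with | none => " " | some x => x

-- once the flag is false, every item is appended (mapped)
lemma auxStep_false (r : List (Option String)) (out : List String) :
    r.foldl auxStep (out, false) = (out ++ r.map toS, false) := by
  induction r generalizing out with
  | nil => simp
  | cons h t ih => cases h <;> simp [auxStep, toS, ih]

-- with the flag true, leading Nones are skipped, then everything is appended
lemma auxStep_true (r : List (Option String)) :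
    r.foldl auxStep ([], true) =
      ((r.dropWhile Option.isNone).map toS,
        (r.foldl auxStep ([], true)).2) := by
  induction r with
  | nil => simp
  | cons h t ih =>
    cases h with
    | none => simpa [auxStep, List.dropWhile] using ih
    | some x => simp [auxStep, auxStep_false, List.dropWhile, toS]

def lastIdx (xs : List (Option String)) : Int :=
  (PySem.List.enumerate xs).foldl (fun acc p => if p.2.isSome then p.1 else acc) (-1 : Int)

lemma lastIdx_snoc (xs : List (Option String)) (x : Option String) :
    lastIdx (xs ++ [x]) = if x.isSome then (xs.length : Int) else lastIdx xs := by
  unfold lastIdx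
  rw [show PySem.List.enumerate (xs ++ [x]) = PySem.List.enumerate xs 0 ++ [((xs.length : Int), x)] by
    simpa using PySem.List.enumerate_append xs [x] 0]
  simp [List.foldl_append, PySem.List.enumerate]

lemma lastIdx_bounds (xs : List (Option String)) :
    -1 ≤ lastIdx xs ∧ lastIdx xs ≤ (xs.length : Int) - 1 := by
  induction xs using List.reverseRecOn with
  | nil => simp [lastIdx, PySem.List.enumerate]
  | append_singleton t x ih =>
    rw [lastIdx_snoc]
    rcases ih with ⟨h1, h2⟩
    cases x <;> simp <;> omega

lemma take_lastIdx (xs : List (Option String)) :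
    xs.take (lastIdx xs + 1).toNat = (xs.reverse.dropWhile Option.isNone).reverse := by
  induction xs using List.reverseRecOn with
  | nil => simp
  | append_singleton t x ih =>
    rw [lastIdx_snoc]
    cases x with
    | some s =>
      have hlen : ((t.length : Int) + 1).toNat = t.length + 1 := by omega
      simp [hlen, List.take_append]
    | none =>
      have hb := lastIdx_bounds t
      have hle : (lastIdx t + 1).toNat ≤ t.length := by omega
      rw [if_neg (by simp)]
      rw [List.take_append_of_le_length hle, ih]
      simp

-- ===== VERDICT (by name: the statement is the Claim_ definition above) =====
theorem aux_spec : Claim_equal_aux := by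
  intro xs _
  show aux xs = aux_alt xs
  unfold aux aux_alt
  have hb := lastIdx_bounds xs
  rw [show (PySem.List.enumerate xs).foldl
      (fun acc p => if p.2.isSome then p.1 else acc) (-1 : Int) = lastIdx xs from rfl]
  rw [PySem.List.slice_to xs (show (0:Int) ≤ lastIdx xs + 1 by omega)]
  rw [auxStep_true]
  rw [take_lastIdx]
  rw [show (fun x => match x with | none => " " | some s => s) = toS from
    funext fun o => by cases o <;> rfl]
  simp [← List.map_reverse]
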